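-- pv_equiv track=rewrite | github.com/trgkanki/interval_booster | src/ivlBoost.py | collectFirstReviewsByInductionLength
-- ===== SOURCE A (Python) =====
-- MAX_INDUCTION_LENGTH = 30
--
-- def collectFirstReviewsByInductionLength(col, cidRevlogDict):
--     ret = [[] for _ in range(MAX_INDUCTION_LENGTH)]
--
--     for cid, cidRevList in cidRevlogDict.items():
--         # Cards may be learned multiple times. Find the last learning episode
--         #  - ex: by rescheduling card to the end of the new card queue.
--         lastLearnEnd = None
--         for i in range(len(cidRevList) - 1, -1, -1):
--             rtype, ease, lastIvl, rtime = cidRevList[i]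
--             if rtype == 0:  # new card
--                 lastLearnEnd = i + 1
--                 break
--         if lastLearnEnd is None:  # haven't finished initial learning
--             continue
--         if lastLearnEnd == len(cidRevList):  # first review not yet done
--             continue
--
--         lastLearnBegin = 0
--         for i in range(lastLearnEnd - 1, -1, -1):
--             if cidRevList[i][0] != 0:
--                 lastLearnBegin = i
--                 break
--
--         inductionLength = lastLearnEnd - lastLearnBegin
--         if inductionLength >= MAX_INDUCTION_LENGTH:
--             continue
--
--         firstReviewEase = cidRevList[lastLearnEnd][1]
--         daysSinceInduction = cidRevList[lastLearnEnd][3] - cidRevList[lastLearnEnd - 1][3]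
--
--         # First review on the same day as today. Outlier.
--         if daysSinceInduction == 0:
--             continue
--
--         ret[inductionLength].append((
--             firstReviewEase != 1,
--             daysSinceInduction
--         ))
--
--     return ret
-- ===== SOURCE B (Python) =====
-- MAX_INDUCTION_LENGTH = 30
--
--
-- def _episodeSample(rl):
--     # One forward pass over the revlog: track the last index with rtype != 0,
--     # the last index with rtype == 0 (-1 = none yet), and the last-nonzero
--     # index captured at the moment each zero is seen (= episode begin).
--     lastNonZero = 0
--     lastZero = -1
--     begin = 0
--     for i, r in enumerate(rl):
--         if r[0] == 0:
--             lastZero = i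
--             begin = lastNonZero
--         else:
--             lastNonZero = i
--     if lastZero < 0 or len(rl) <= lastZero + 1:
--         return None  # never learned, or first review not yet done
--     end = lastZero + 1
--     il = end - begin
--     gap = rl[end][3] - rl[lastZero][3]
--     if il >= MAX_INDUCTION_LENGTH or gap == 0:
--         return None
--     return (il, (rl[end][1] != 1, gap))
--
--
-- def collectFirstReviewsByInductionLength(col, cidRevlogDict):
--     # Flat list of (bucket, sample) pairs, then build each bucket by filtering.
--     samples = [s for s in map(_episodeSample, cidRevlogDict.values()) if s is not None]
--     return [[t for il, t in samples if il == k] for k in range(MAX_INDUCTION_LENGTH)]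
-- ===== Notes on version B (the rewrite author's own statement) =====
-- stated objective: alternative
-- what changed: Per card, A's two backward break-scans become one forward pass tracking (last nonzero index, last zero index, last nonzero captured at each zero), and the result is assembled not by appending into mutable buckets during the loop but by collecting a flat list of (bucket, sample) pairs and building each of the 30 buckets with a filter.
import Mathlib
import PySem

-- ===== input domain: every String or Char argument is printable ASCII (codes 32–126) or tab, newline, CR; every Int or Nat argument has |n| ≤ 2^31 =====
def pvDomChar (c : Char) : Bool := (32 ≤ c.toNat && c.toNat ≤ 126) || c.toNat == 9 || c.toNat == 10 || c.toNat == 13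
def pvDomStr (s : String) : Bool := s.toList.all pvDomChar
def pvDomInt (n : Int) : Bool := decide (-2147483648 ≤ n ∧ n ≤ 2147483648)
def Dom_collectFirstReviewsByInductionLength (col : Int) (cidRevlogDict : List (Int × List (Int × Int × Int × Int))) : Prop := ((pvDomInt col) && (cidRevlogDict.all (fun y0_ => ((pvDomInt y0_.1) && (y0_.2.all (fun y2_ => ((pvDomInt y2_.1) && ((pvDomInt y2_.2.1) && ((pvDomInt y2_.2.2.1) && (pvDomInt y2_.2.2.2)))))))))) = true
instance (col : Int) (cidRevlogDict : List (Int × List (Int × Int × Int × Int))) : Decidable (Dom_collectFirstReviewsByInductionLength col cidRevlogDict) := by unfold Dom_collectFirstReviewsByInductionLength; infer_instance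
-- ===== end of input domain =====

-- B replaces A's two backward break-scans per card by a single forward pass over the
-- revlog and assembles the buckets by filtering a flat (bucket, sample) list instead
-- of appending into the bucket array during the loop (objective: alternative, same cost).


-- ===== PORT A =====
-- `for i in range(len(cidRevList)-1, -1, -1): … if rtype == 0: lastLearnEnd = i+1; break`
-- (downward index scan; the argument k is i+1, so index k-1 is examined first)
def pvFindEndGoA (rl : List (Int × Int × Int × Int)) : Nat → Option Nat
  | 0 => none
  | k + 1 => if (rl.getD k (0, 0, 0, 0)).1 = 0 then some (k + 1) else pvFindEndGoA rl k

-- `for i in range(lastLearnEnd-1, -1, -1): if cidRevList[i][0] != 0: lastLearnBegin = i; break` (default 0)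
def pvFindBeginGoA (rl : List (Int × Int × Int × Int)) : Nat → Nat
  | 0 => 0
  | k + 1 => if (rl.getD k (0, 0, 0, 0)).1 ≠ 0 then k else pvFindBeginGoA rl k

-- the body of A's outer loop for one card: `none` = `continue`, otherwise bucket index and tuple
def pvCardA (rl : List (Int × Int × Int × Int)) : Option (Nat × (Bool × Int)) :=
  match pvFindEndGoA rl rl.length with
  | none => none
  | some lastLearnEnd =>
    if lastLearnEnd = rl.length then none
    else
      let lastLearnBegin := pvFindBeginGoA rl lastLearnEnd
      let inductionLength := lastLearnEnd - lastLearnBegin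
      if 30 ≤ inductionLength then none
      else
        let firstReviewEase := (rl.getD lastLearnEnd (0, 0, 0, 0)).2.1
        let daysSinceInduction :=
          (rl.getD lastLearnEnd (0, 0, 0, 0)).2.2.2 - (rl.getD (lastLearnEnd - 1) (0, 0, 0, 0)).2.2.2
        if daysSinceInduction = 0 then none
        else some (inductionLength, (decide (firstReviewEase ≠ 1), daysSinceInduction))

def collectFirstReviewsByInductionLength (col : Int) (cidRevlogDict : List (Int × List (Int × Int × Int × Int))) : List (List (Bool × Int)) :=
  ((PySem.Dict.ofList cidRevlogDict).items).foldl
    (fun ret kv =>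
      match pvCardA kv.2 with
      | none => ret
      | some (il, x) => ret.modify il (· ++ [x]))
    (List.replicate 30 [])

-- ===== PORT B =====
-- `_episodeSample`: forward pass with state (lastNonZero, lastZero, begin); lastZero = -1 means none seen
def pvEpisodeSample (rl : List (Int × Int × Int × Int)) : Option (Nat × (Bool × Int)) :=
  let s := rl.zipIdx.foldl
    (fun (s : Nat × Int × Nat) p =>
      if p.1.1 = 0 then (s.1, (p.2 : Int), s.1) else (p.2, s.2.1, s.2.2))
    (0, -1, 0)
  if s.2.1 < 0 ∨ (rl.length : Int) ≤ s.2.1 + 1 then none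
  else
    let e := s.2.1.toNat + 1
    let il := e - s.2.2
    let gap := (rl.getD e (0, 0, 0, 0)).2.2.2 - (rl.getD s.2.1.toNat (0, 0, 0, 0)).2.2.2
    if 30 ≤ il ∨ gap = 0 then none
    else some (il, (decide ((rl.getD e (0, 0, 0, 0)).2.1 ≠ 1), gap))

def collectFirstReviewsByInductionLength_alt (col : Int) (cidRevlogDict : List (Int × List (Int × Int × Int × Int))) : List (List (Bool × Int)) :=
  let samples := (((PySem.Dict.ofList cidRevlogDict).values).map pvEpisodeSample).filterMap id
  (List.range 30).map (fun k => samples.filterMap (fun p => if p.1 = k then some p.2 else none))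

-- ===== PRECONDITION & SPEC =====
def Spec_collectFirstReviewsByInductionLength (col : Int) (cidRevlogDict : List (Int × List (Int × Int × Int × Int))) (out : List (List (Bool × Int))) : Prop := out = collectFirstReviewsByInductionLength_alt col cidRevlogDict
instance (col : Int) (cidRevlogDict : List (Int × List (Int × Int × Int × Int))) (out : List (List (Bool × Int))) : Decidable (Spec_collectFirstReviewsByInductionLength col cidRevlogDict out) := by unfold Spec_collectFirstReviewsByInductionLength; infer_instance

-- ===== CLAIM (what is proved, stated in full; the proofs are below) =====
def Claim_equal_collectFirstReviewsByInductionLength : Prop := ∀ (col : Int) (cidRevlogDict : List (Int × List (Int × Int × Int × Int))), Dom_collectFirstReviewsByInductionLength col cidRevlogDict → Spec_collectFirstReviewsByInductionLength col cidRevlogDict (collectFirstReviewsByInductionLength col cidRevlogDict)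

-- ===== LEMMAS AND PROOFS =====

-- the downward scans never look past index k, so appending on the right is invisible
theorem pvFindEndGoA_append (rl s : List (Int × Int × Int × Int)) (k : Nat) (hk : k ≤ rl.length) :
    pvFindEndGoA (rl ++ s) k = pvFindEndGoA rl k := by
  induction k with
  | zero => rfl
  | succ k ih =>
    simp only [pvFindEndGoA, List.getD_append rl s _ k (by omega), ih (by omega)]

theorem pvFindBeginGoA_append (rl s : List (Int × Int × Int × Int)) (k : Nat) (hk : k ≤ rl.length) :
    pvFindBeginGoA (rl ++ s) k = pvFindBeginGoA rl k := by
  induction k with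
  | zero => rfl
  | succ k ih =>
    simp only [pvFindBeginGoA, List.getD_append rl s _ k (by omega), ih (by omega)]

theorem pvFindEndGoA_bounds (rl : List (Int × Int × Int × Int)) (k e : Nat)
    (h : pvFindEndGoA rl k = some e) :
    1 ≤ e ∧ e ≤ k ∧ (rl.getD (e - 1) (0, 0, 0, 0)).1 = 0 := by
  induction k with
  | zero => simp [pvFindEndGoA] at h
  | succ k ih =>
    simp only [pvFindEndGoA] at h
    split at h
    · rename_i hz
      obtain rfl : k + 1 = e := Option.some.inj h
      exact ⟨by omega, le_refl _, by simpa using hz⟩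
    · obtain ⟨h1, h2, h3⟩ := ih h
      exact ⟨h1, by omega, h3⟩

-- characterisation of B's forward fold by A's two downward scans
theorem pvFoldB_char (rl : List (Int × Int × Int × Int)) :
    rl.zipIdx.foldl
      (fun (s : Nat × Int × Nat) p =>
        if p.1.1 = 0 then (s.1, (p.2 : Int), s.1) else (p.2, s.2.1, s.2.2))
      (0, -1, 0) =
      (pvFindBeginGoA rl rl.length,
       (match pvFindEndGoA rl rl.length with
        | some e => (e : Int) - 1
        | none => -1),
       (match pvFindEndGoA rl rl.length with
        | some e => pvFindBeginGoA rl (e - 1)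
        | none => 0)) := by
  induction rl using List.reverseRecOn with
  | nil => rfl
  | append_singleton rl x ih =>
    have hlen : (rl ++ [x]).length = rl.length + 1 := by simp
    rw [List.zipIdx_append, List.foldl_append, ih]
    simp only [List.zipIdx, hlen]
    by_cases hx : x.1 = 0
    · have hE : pvFindEndGoA (rl ++ [x]) (rl.length + 1) = some (rl.length + 1) := by
        simp [pvFindEndGoA, hx]
      have hB : pvFindBeginGoA (rl ++ [x]) (rl.length + 1) = pvFindBeginGoA rl rl.length := by
        simp [pvFindBeginGoA, hx, pvFindBeginGoA_append rl [x] rl.length le_rfl]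
      simp only [hE, hB]
      simp [hx, pvFindBeginGoA_append rl [x] rl.length le_rfl]
    · have hE : pvFindEndGoA (rl ++ [x]) (rl.length + 1) = pvFindEndGoA rl rl.length := by
        simp [pvFindEndGoA, hx, pvFindEndGoA_append rl [x] rl.length le_rfl]
      have hB : pvFindBeginGoA (rl ++ [x]) (rl.length + 1) = rl.length := by
        simp [pvFindBeginGoA, hx]
      simp only [hE, hB]
      cases hfe : pvFindEndGoA rl rl.length with
      | none => simp [hx]
      | some e =>
        have hb := pvFindEndGoA_bounds rl rl.length e hfe
        simp [hx, pvFindBeginGoA_append rl [x] (e - 1) (by omega)]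

-- the per-card analyses agree
theorem pvCardA_eq_pvEpisodeSample (rl : List (Int × Int × Int × Int)) :
    pvCardA rl = pvEpisodeSample rl := by
  unfold pvCardA pvEpisodeSample
  rw [pvFoldB_char]
  cases hfe : pvFindEndGoA rl rl.length with
  | none => simp
  | some e =>
    obtain ⟨h1, h2, h3⟩ := pvFindEndGoA_bounds rl rl.length e hfe
    have he1 : ¬ ((e : Int) - 1 < 0) := by omega
    have he2 : ((e : Int) - 1).toNat = e - 1 := by omega
    have he3 : e - 1 + 1 = e := by omega
    have hbeg : pvFindBeginGoA rl e = pvFindBeginGoA rl (e - 1) := by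
      conv_lhs => rw [← he3]
      simp only [pvFindBeginGoA]
      rw [if_neg (not_not_intro h3)]
    simp only [he1, he2, he3, hbeg, false_or]
    by_cases hEnd : e = rl.length
    · simp [hEnd]
    · have : ¬ ((rl.length : Int) ≤ (e : Int) - 1 + 1) := by
        have : e < rl.length := by
          rcases Nat.lt_or_ge e rl.length with h | h
          · exact h
          · omega
        omega
      simp only [hEnd, if_neg this, if_false]
      by_cases hIl : 30 ≤ e - pvFindBeginGoA rl (e - 1)
      · simp [hIl]
      · by_cases hGap : (rl.getD e (0, 0, 0, 0)).2.2.2 - (rl.getD (e - 1) (0, 0, 0, 0)).2.2.2 = 0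
        · simp [hIl]
        · simp [hIl, hGap]

-- A's result buckets are below 30
theorem pvCardA_lt (rl : List (Int × Int × Int × Int)) (il : Nat) (x : Bool × Int)
    (h : pvCardA rl = some (il, x)) : il < 30 := by
  unfold pvCardA at h
  split at h
  · simp at h
  · split at h
    · simp at h
    · dsimp only at h
      split at h
      · simp at h
      · split at h
        · simp at h
        · rename_i hil _
          obtain rfl : _ = il := congrArg Prod.fst (Option.some.inj h)
          omega

-- A's fold skips the `continue`d cards: it is a fold over the filterMap of the per-card results
theorem foldA_skip (xs : List (Int × List (Int × Int × Int × Int)))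
    (acc : List (List (Bool × Int))) :
    xs.foldl
      (fun ret kv =>
        match pvCardA kv.2 with
        | none => ret
        | some (il, x) => ret.modify il (· ++ [x])) acc =
      ((xs.map (fun kv => pvCardA kv.2)).filterMap id).foldl
        (fun ret p => ret.modify p.1 (· ++ [p.2])) acc := by
  induction xs generalizing acc with
  | nil => rfl
  | cons kv ys ih =>
    cases h : pvCardA kv.2 with
    | none => simpa [h] using ih acc
    | some p =>
      cases p with
      | mk il x => simpa [h] using ih (acc.modify il (· ++ [x]))

-- modifying one slot of a range-map
theorem map_range_modify {α : Type} (n k : Nat) (hk : k < n) (g : Nat → α) (f : α → α) :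
    ((List.range n).map g).modify k f =
      (List.range n).map (fun j => if j = k then f (g j) else g j) := by
  apply List.ext_getElem
  · simp
  · intro i h1 h2
    simp only [List.getElem_modify, List.getElem_map, List.getElem_range] at *
    by_cases hik : i = k
    · simp [hik]
    · rw [if_neg (mt Eq.symm hik), if_neg hik]

-- bucket-append fold = per-bucket filter, for bucket indices below 30
theorem foldl_buckets {T : Type} (samples : List (Nat × T))
    (hlt : ∀ p ∈ samples, p.1 < 30) (g : Nat → List T) :
    samples.foldl (fun ret p => ret.modify p.1 (· ++ [p.2])) ((List.range 30).map g) =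
      (List.range 30).map
        (fun k => g k ++ samples.filterMap (fun p => if p.1 = k then some p.2 else none)) := by
  induction samples generalizing g with
  | nil => simp
  | cons p rest ih =>
    simp only [List.foldl_cons]
    rw [map_range_modify 30 p.1 (hlt p (by simp)) g (· ++ [p.2]),
        ih (fun q hq => hlt q (by simp [hq]))]
    apply List.map_congr_left
    intro k hk
    by_cases hpk : p.1 = k
    · simp [hpk, List.append_assoc]
    · have : ¬ k = p.1 := fun h => hpk h.symm
      simp [hpk, this]

-- ===== VERDICT (by name: the statement is the Claim_ definition above) =====
theorem collectFirstReviewsByInductionLength_spec : Claim_equal_collectFirstReviewsByInductionLength := by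
  intro col cidRevlogDict _
  unfold Spec_collectFirstReviewsByInductionLength
  unfold collectFirstReviewsByInductionLength collectFirstReviewsByInductionLength_alt
  rw [foldA_skip]
  have hrep : (List.replicate 30 ([] : List (Bool × Int))) = (List.range 30).map (fun _ => []) := by
    simp
  rw [hrep, foldl_buckets _ ?_ (fun _ => [])]
  · have hvals : List.filterMap (fun x => pvEpisodeSample x) ((PySem.Dict.ofList cidRevlogDict).values) =
        List.filterMap (fun kv => pvCardA kv.2) ((PySem.Dict.ofList cidRevlogDict).items) := by
      simp only [PySem.Dict.values, List.filterMap_map]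
      exact List.filterMap_congr (fun kv _ => by
        simp [Function.comp, pvCardA_eq_pvEpisodeSample kv.2])
    simp [hvals]
  · intro p hp
    simp only [List.mem_filterMap, List.mem_map, id] at hp
    obtain ⟨o, ⟨kv, _, rfl⟩, ho⟩ := hp
    exact pvCardA_lt kv.2 p.1 p.2 (by simpa using ho)
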